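-- pv_equiv track=rewrite | github.com/zoraaisd/CRMS2.0 | Backend/deals/models.py | _rewrite_legacy_kwargs
-- ===== SOURCE A (Python) =====
-- def _rewrite_legacy_kwargs(kwargs: dict) -> dict:
--     remapped = {}
--     for key, value in kwargs.items():
--         if key == "name":
--             remapped["deal_name"] = value
--             continue
--         if key.startswith("name__"):
--             remapped[key.replace("name__", "deal_name__", 1)] = value
--             continue
--         if key == "owner":
--             remapped["deal_owner"] = value
--             continue
--         if key.startswith("owner__"):
--             remapped[key.replace("owner__", "deal_owner__", 1)] = value
--             continue
--         if key == "value":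
--             remapped["expected_revenue"] = value
--             continue
--         if key.startswith("value__"):
--             remapped[key.replace("value__", "expected_revenue__", 1)] = value
--             continue
--         remapped[key] = value
--     return remapped
-- ===== SOURCE B (Python) =====
-- _LEGACY = {"name": "deal_name", "owner": "deal_owner", "value": "expected_revenue"}
--
-- def _rewrite_legacy_kwargs(kwargs: dict) -> dict:
--     remapped = {}
--     for key, value in kwargs.items():
--         base, *rest = key.split("__", 1)
--         mapped = _LEGACY.get(base)
--         if mapped is None:
--             remapped[key] = value
--         elif rest:
--             remapped[mapped + "__" + rest[0]] = value
--         else: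
--             remapped[mapped] = value
--     return remapped
-- ===== Notes on version B (the rewrite author's own statement) =====
-- stated objective: simpler
-- what changed: Replaces A's six-branch equality/startswith/replace chain by a single split of the key on '__' (maxsplit 1) plus one fixed lookup table {'name','owner','value'} that decides the remapped base, re-attaching the suffix only when a separator was present.
import Mathlib
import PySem

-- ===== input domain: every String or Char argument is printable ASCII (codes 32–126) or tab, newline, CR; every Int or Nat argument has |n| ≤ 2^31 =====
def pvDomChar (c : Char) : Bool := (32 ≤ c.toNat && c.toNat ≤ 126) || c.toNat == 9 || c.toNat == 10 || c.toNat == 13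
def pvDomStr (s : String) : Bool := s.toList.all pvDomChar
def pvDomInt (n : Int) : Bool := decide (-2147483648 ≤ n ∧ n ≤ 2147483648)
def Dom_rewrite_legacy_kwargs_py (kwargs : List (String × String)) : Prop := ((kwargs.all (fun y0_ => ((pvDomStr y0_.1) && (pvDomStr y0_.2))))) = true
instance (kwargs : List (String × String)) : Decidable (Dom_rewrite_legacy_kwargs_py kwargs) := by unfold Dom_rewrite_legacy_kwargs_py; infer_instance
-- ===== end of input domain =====

-- B replaces A's six-branch prefix/equality chain by one split-on-"__" plus a fixed lookup table (objective: simpler).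

-- ===== PORT A =====
-- hand port of key.replace(old, new, 1): replace the FIRST occurrence of old; exact for nonempty old
-- (A only calls it with the nonempty literals "name__"/"owner__"/"value__").
def pvReplace1Chars (old new : List Char) : List Char → List Char
  | [] => []
  | c :: rest =>
    if old.isPrefixOf (c :: rest) then new ++ (c :: rest).drop old.length
    else c :: pvReplace1Chars old new rest

def pvReplace1 (s old new : String) : String :=
  String.ofList (pvReplace1Chars old.toList new.toList s.toList)

-- loop body of A: the if/continue chain, one dict write per key
def pvStepA (remapped : PySem.Dict String String) (kv : String × String) : PySem.Dict String String :=
  if kv.1 == "name" then remapped.insert "deal_name" kv.2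
  else if PySem.Str.startswith kv.1 "name__" then remapped.insert (pvReplace1 kv.1 "name__" "deal_name__") kv.2
  else if kv.1 == "owner" then remapped.insert "deal_owner" kv.2
  else if PySem.Str.startswith kv.1 "owner__" then remapped.insert (pvReplace1 kv.1 "owner__" "deal_owner__") kv.2
  else if kv.1 == "value" then remapped.insert "expected_revenue" kv.2
  else if PySem.Str.startswith kv.1 "value__" then remapped.insert (pvReplace1 kv.1 "value__" "expected_revenue__") kv.2
  else remapped.insert kv.1 kv.2

def rewrite_legacy_kwargs_py (kwargs : List (String × String)) : List (String × String) :=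
  (kwargs.foldl pvStepA PySem.Dict.empty).items

-- ===== PORT B =====
def pvLegacyMap : PySem.Dict String String :=
  ((PySem.Dict.empty.insert "name" "deal_name").insert "owner" "deal_owner").insert "value" "expected_revenue"

-- loop body of B: split key on "__" (maxsplit 1), look the base up in the table
def pvStepB (remapped : PySem.Dict String String) (kv : String × String) : PySem.Dict String String :=
  match (PySem.Str.splitMax? kv.1 "__" 1).getD [kv.1] with   -- getD: totality guard, sep "__" ≠ "" so always some
  | base :: rest =>
    match PySem.Dict.get? pvLegacyMap base with
    | none => remapped.insert kv.1 kv.2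
    | some m =>
      match rest with
      | r :: _ => remapped.insert (m ++ "__" ++ r) kv.2
      | [] => remapped.insert m kv.2
  | [] => remapped.insert kv.1 kv.2                           -- unreachable: split yields ≥ 1 piece

def rewrite_legacy_kwargs_py_alt (kwargs : List (String × String)) : List (String × String) :=
  (kwargs.foldl pvStepB PySem.Dict.empty).items

-- ===== PRECONDITION & SPEC =====
def Spec_rewrite_legacy_kwargs_py (kwargs : List (String × String)) (out : List (String × String)) : Prop := out = rewrite_legacy_kwargs_py_alt kwargs
instance (kwargs : List (String × String)) (out : List (String × String)) : Decidable (Spec_rewrite_legacy_kwargs_py kwargs out) := by unfold Spec_rewrite_legacy_kwargs_py; infer_instance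

-- ===== CLAIM (what is proved, stated in full; the proofs are below) =====
def Claim_equal_rewrite_legacy_kwargs_py : Prop := ∀ (kwargs : List (String × String)), Dom_rewrite_legacy_kwargs_py kwargs → Spec_rewrite_legacy_kwargs_py kwargs (rewrite_legacy_kwargs_py kwargs)

-- ===== LEMMAS AND PROOFS =====

-- first occurrence of "__": none, or the pieces before/after it
def pvFirstSplit : List Char → Option (List Char × List Char)
  | [] => none
  | c :: rest =>
    if ['_','_'].isPrefixOf (c :: rest) then some ([], (c :: rest).drop 2)
    else (pvFirstSplit rest).map (fun pq => (c :: pq.1, pq.2))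

theorem pvFirstSplit_append (p q : List Char) (hp : '_' ∉ p) :
    pvFirstSplit (p ++ '_' :: '_' :: q) = some (p, q) := by
  induction p with
  | nil => simp [pvFirstSplit, List.isPrefixOf]
  | cons c cs ih =>
    have hc : c ≠ '_' := fun h => hp (h ▸ List.mem_cons_self)
    have hcs : '_' ∉ cs := fun h => hp (List.mem_cons_of_mem _ h)
    have hpre : ['_','_'].isPrefixOf (c :: (cs ++ '_' :: '_' :: q)) = false := by
      have hcne : (('_' : Char) == c) = false := by
        simp; intro h; exact hc h.symm
      simp [List.isPrefixOf, hcne]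
    simp [pvFirstSplit, hpre, ih hcs]

theorem pvFirstSplit_eq_append {l p q : List Char} (h : pvFirstSplit l = some (p, q)) :
    l = p ++ '_' :: '_' :: q := by
  induction l generalizing p q with
  | nil => simp [pvFirstSplit] at h
  | cons c rest ih =>
    by_cases hpre : ['_','_'].isPrefixOf (c :: rest) = true
    · rw [pvFirstSplit, if_pos hpre] at h
      obtain ⟨hp, hq⟩ : [] = p ∧ (c :: rest).drop 2 = q := by
        have := Option.some.inj h; exact ⟨congrArg Prod.fst this, congrArg Prod.snd this⟩
      obtain ⟨h1, rest', hr⟩ : c = '_' ∧ ∃ rest', rest = '_' :: rest' := by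
        cases rest with
        | nil => simp [List.isPrefixOf] at hpre
        | cons d rest' =>
          simp [List.isPrefixOf] at hpre
          exact ⟨hpre.1.symm, rest', by rw [← hpre.2]⟩
      subst h1; subst hr
      simp at hp hq
      simp [← hp, ← hq]
    · rw [pvFirstSplit, if_neg hpre] at h
      cases hfs : pvFirstSplit rest with
      | none => rw [hfs] at h; simp at h
      | some pq =>
        obtain ⟨p', q'⟩ := pq
        rw [hfs] at h
        simp at h
        obtain ⟨hp, hq⟩ := h
        rw [← hp, ← hq, ih hfs]
        simp

-- once maxsplit is exhausted the scanner returns the remainder as the last piece, whatever the fuel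
theorem pv_go_zero (fuel : Nat) (q : List Char) (acc : List (List Char)) :
    PySem.Chars.splitOnMax.go ['_','_'] fuel 0 q [] acc = (q :: acc).reverse := by
  cases fuel with
  | zero => simp [PySem.Chars.splitOnMax.go]
  | succ n => cases q with
    | nil => simp [PySem.Chars.splitOnMax.go]
    | cons c rest => simp [PySem.Chars.splitOnMax.go]

theorem pv_go_one (fuel : Nat) (l cur : List Char) (acc : List (List Char))
    (hf : l.length < fuel) :
    PySem.Chars.splitOnMax.go ['_','_'] fuel 1 l cur acc =
      (match pvFirstSplit l with
       | none => ((cur.reverse ++ l) :: acc).reverse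
       | some (p, q) => (q :: (cur.reverse ++ p) :: acc).reverse) := by
  induction fuel generalizing l cur acc with
  | zero => omega
  | succ n ih =>
    cases l with
    | nil => simp [PySem.Chars.splitOnMax.go, pvFirstSplit]
    | cons c rest =>
      by_cases hpre : ['_','_'].isPrefixOf (c :: rest) = true
      · rw [pvFirstSplit, if_pos hpre]
        have : PySem.Chars.splitOnMax.go ['_','_'] (n+1) 1 (c :: rest) cur acc =
            PySem.Chars.splitOnMax.go ['_','_'] n 0 ((c :: rest).drop 2) [] (cur.reverse :: acc) := by
          simp [PySem.Chars.splitOnMax.go, hpre]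
        rw [this, pv_go_zero]
        obtain ⟨h1, rest', hr⟩ : c = '_' ∧ ∃ rest', rest = '_' :: rest' := by
          cases rest with
          | nil => simp [List.isPrefixOf] at hpre
          | cons d rest' =>
            simp [List.isPrefixOf] at hpre
            exact ⟨hpre.1.symm, rest', by rw [← hpre.2]⟩
        subst h1; subst hr
        simp
      · rw [pvFirstSplit, if_neg hpre]
        have hstep : PySem.Chars.splitOnMax.go ['_','_'] (n+1) 1 (c :: rest) cur acc =
            PySem.Chars.splitOnMax.go ['_','_'] n 1 rest (c :: cur) acc := by
          simp [PySem.Chars.splitOnMax.go, hpre]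
        rw [hstep, ih rest (c :: cur) acc (by simp at hf ⊢; omega)]
        cases hfs : pvFirstSplit rest with
        | none => simp
        | some pq => simp

theorem pv_splitOnMax_eq (l : List Char) :
    PySem.Chars.splitOnMax l ['_','_'] 1 =
      (match pvFirstSplit l with
       | none => [l]
       | some (p, q) => [p, q]) := by
  rw [PySem.Chars.splitOnMax, if_neg (by norm_num)]
  rw [show (1 : Int).toNat = 1 from rfl, pv_go_one _ _ _ _ (by omega)]
  cases hfs : pvFirstSplit l with
  | none => simp
  | some pq => obtain ⟨p, q⟩ := pq; simp

theorem pv_splitMax?_eq (k : String) :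
    (PySem.Str.splitMax? k "__" 1).getD [k] =
      (match pvFirstSplit k.toList with
       | none => [String.ofList k.toList]
       | some (p, q) => [String.ofList p, String.ofList q]) := by
  rw [PySem.Str.splitMax?, PySem.Chars.splitMax?]
  have hsep : ("__" : String).toList = ['_','_'] := rfl
  rw [hsep, if_neg (by norm_num), pv_splitOnMax_eq]
  cases hfs : pvFirstSplit k.toList with
  | none => simp
  | some pq => simp

-- the table lookup on an arbitrary base string
theorem pv_legacyMap_get?_of_ne (b : String) (h1 : b ≠ "name") (h2 : b ≠ "owner") (h3 : b ≠ "value") :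
    PySem.Dict.get? pvLegacyMap b = none := by
  have h : pvLegacyMap = PySem.Dict.mk [("name", "deal_name"), ("owner", "deal_owner"), ("value", "expected_revenue")] := by decide
  rw [h]
  simp [PySem.Dict.get?_mk_cons, Ne.symm h1, Ne.symm h2, Ne.symm h3]
  rfl

-- the core step-equality: A's branch chain and B's split+lookup rewrite every key identically
theorem pvStep_eq (d : PySem.Dict String String) (kv : String × String) :
    pvStepA d kv = pvStepB d kv := by
  obtain ⟨k, v⟩ := kv
  by_cases h1 : k = "name"
  · subst h1
    have hB : pvStepB d ("name", v) = d.insert "deal_name" v := by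
      rw [pvStepB]
      norm_num [show PySem.Str.splitMax? "name" "__" 1 = some ["name"] from by decide,
                show PySem.Dict.get? pvLegacyMap "name" = some "deal_name" from by decide]
    rw [hB]; simp [pvStepA]
  by_cases h2 : PySem.Chars.startswith k.toList ['n','a','m','e','_','_'] = true
  · obtain ⟨t, ht⟩ : ∃ t, k.toList = ['n','a','m','e','_','_'] ++ t := by
      obtain ⟨t, ht⟩ := (PySem.Chars.startswith_iff _ _).mp h2
      exact ⟨t, ht.symm⟩
    have hsplit : pvFirstSplit k.toList = some (['n','a','m','e'], t) := by
      rw [ht]; exact pvFirstSplit_append ['n','a','m','e'] t (by decide)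
    have hA : pvStepA d (k, v) = d.insert (pvReplace1 k "name__" "deal_name__") v := by
      simp [pvStepA, h1, h2]
    have hB : pvStepB d (k, v) = d.insert ("deal_name" ++ "__" ++ String.ofList t) v := by
      rw [pvStepB]
      simp only [pv_splitMax?_eq, hsplit]
      rfl
    rw [hA, hB]
    congr 1
    apply String.toList_inj.mp
    simp [pvReplace1, ht, pvReplace1Chars, List.isPrefixOf]
  by_cases h3 : k = "owner"
  · subst h3
    have hB : pvStepB d ("owner", v) = d.insert "deal_owner" v := by
      rw [pvStepB]
      norm_num [show PySem.Str.splitMax? "owner" "__" 1 = some ["owner"] from by decide,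
                show PySem.Dict.get? pvLegacyMap "owner" = some "deal_owner" from by decide]
    rw [hB]; norm_num [pvStepA, PySem.Chars.startswith, List.isPrefixOf,
      show ¬("name__".toList <+: "owner".toList) from by decide, h1]
  by_cases h4 : PySem.Chars.startswith k.toList ['o','w','n','e','r','_','_'] = true
  · obtain ⟨t, ht⟩ : ∃ t, k.toList = ['o','w','n','e','r','_','_'] ++ t := by
      obtain ⟨t, ht⟩ := (PySem.Chars.startswith_iff _ _).mp h4
      exact ⟨t, ht.symm⟩
    have hsplit : pvFirstSplit k.toList = some (['o','w','n','e','r'], t) := by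
      rw [ht]; exact pvFirstSplit_append ['o','w','n','e','r'] t (by decide)
    have hA : pvStepA d (k, v) = d.insert (pvReplace1 k "owner__" "deal_owner__") v := by
      simp [pvStepA, h1, h2, h3, h4]
    have hB : pvStepB d (k, v) = d.insert ("deal_owner" ++ "__" ++ String.ofList t) v := by
      rw [pvStepB]
      simp only [pv_splitMax?_eq, hsplit]
      rfl
    rw [hA, hB]
    congr 1
    apply String.toList_inj.mp
    simp [pvReplace1, ht, pvReplace1Chars, List.isPrefixOf]
  by_cases h5 : k = "value"
  · subst h5
    have hB : pvStepB d ("value", v) = d.insert "expected_revenue" v := by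
      rw [pvStepB]
      norm_num [show PySem.Str.splitMax? "value" "__" 1 = some ["value"] from by decide,
                show PySem.Dict.get? pvLegacyMap "value" = some "expected_revenue" from by decide]
    rw [hB]; norm_num [pvStepA, PySem.Chars.startswith, List.isPrefixOf,
      show ¬("name__".toList <+: "value".toList) from by decide,
      show ¬("owner__".toList <+: "value".toList) from by decide, h1, h3]
  by_cases h6 : PySem.Chars.startswith k.toList ['v','a','l','u','e','_','_'] = true
  · obtain ⟨t, ht⟩ : ∃ t, k.toList = ['v','a','l','u','e','_','_'] ++ t := by
      obtain ⟨t, ht⟩ := (PySem.Chars.startswith_iff _ _).mp h6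
      exact ⟨t, ht.symm⟩
    have hsplit : pvFirstSplit k.toList = some (['v','a','l','u','e'], t) := by
      rw [ht]; exact pvFirstSplit_append ['v','a','l','u','e'] t (by decide)
    have hA : pvStepA d (k, v) = d.insert (pvReplace1 k "value__" "expected_revenue__") v := by
      simp [pvStepA, h1, h2, h3, h4, h5, h6]
    have hB : pvStepB d (k, v) = d.insert ("expected_revenue" ++ "__" ++ String.ofList t) v := by
      rw [pvStepB]
      simp only [pv_splitMax?_eq, hsplit]
      rfl
    rw [hA, hB]
    congr 1
    apply String.toList_inj.mp
    simp [pvReplace1, ht, pvReplace1Chars, List.isPrefixOf]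
  -- no branch fires: A keeps the key; B's lookup must miss
  have hA : pvStepA d (k, v) = d.insert k v := by
    simp [pvStepA, h1, h2, h3, h4, h5, h6]
  have hB : pvStepB d (k, v) = d.insert k v := by
    rw [pvStepB]
    simp only [pv_splitMax?_eq]
    cases hfs : pvFirstSplit k.toList with
    | none =>
      have hget : PySem.Dict.get? pvLegacyMap k = none := pv_legacyMap_get?_of_ne k h1 h3 h5
      simp [String.ofList_toList, hget]
    | some pq =>
      obtain ⟨p, q⟩ := pq
      have hk : k.toList = p ++ '_' :: '_' :: q := pvFirstSplit_eq_append hfs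
      have hget : PySem.Dict.get? pvLegacyMap (String.ofList p) = none := by
        apply pv_legacyMap_get?_of_ne
        · intro h
          apply h2
          apply (PySem.Chars.startswith_iff _ _).mpr
          have hp : p = "name".toList := by
            have := congrArg String.toList h; rwa [String.toList_ofList] at this
          exact ⟨q, by rw [hk, hp]; rfl⟩
        · intro h
          apply h4
          apply (PySem.Chars.startswith_iff _ _).mpr
          have hp : p = "owner".toList := by
            have := congrArg String.toList h; rwa [String.toList_ofList] at this
          exact ⟨q, by rw [hk, hp]; rfl⟩
        · intro h
          apply h6
          apply (PySem.Chars.startswith_iff _ _).mpr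
          have hp : p = "value".toList := by
            have := congrArg String.toList h; rwa [String.toList_ofList] at this
          exact ⟨q, by rw [hk, hp]; rfl⟩
      simp [hget]
  rw [hA, hB]

-- ===== VERDICT (by name: the statement is the Claim_ definition above) =====
theorem rewrite_legacy_kwargs_py_spec : Claim_equal_rewrite_legacy_kwargs_py := by
  intro kwargs _
  unfold Spec_rewrite_legacy_kwargs_py rewrite_legacy_kwargs_py rewrite_legacy_kwargs_py_alt
  rw [show pvStepA = pvStepB from funext fun d => funext fun kv => pvStep_eq d kv]
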